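-- pv_equiv track=rewrite | github.com/albertolanzini/codeSmellReviewer | .github/scripts/context_extractor.py | _extract_class_context
-- ===== SOURCE A (Python) =====
-- from typing import List
--
-- def _extract_class_context(lines: List[str], issue: dict) -> str:
--     class_start, class_end = None, None
--     for i, line in enumerate(lines):
--         if 'class ' in line and class_start is None:
--             class_start = i
--         if '}' in line and class_start is not None:
--             class_end = i
--     if class_start is not None and class_end is not None:
--         return ''.join(lines[class_start:class_end+1])
--     return ''.join(lines)
-- ===== SOURCE B (Python) =====
-- def _extract_class_context(lines, issue):
--     class_start = next((i for i, line in enumerate(lines) if 'class ' in line), None)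
--     if class_start is not None:
--         for j, line in reversed(list(enumerate(lines))):
--             if j < class_start:
--                 break
--             if '}' in line:
--                 return ''.join(lines[class_start:j + 1])
--     return ''.join(lines)
-- ===== Notes on version B (the rewrite author's own statement) =====
-- stated objective: alternative
-- what changed: Replaces A's single forward pass maintaining two optional indices by two independent early-exit scans: a forward generator search for the first 'class ' line and a backward scan (reversed enumerate) for the last '}' line at or after it.
import Mathlib
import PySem

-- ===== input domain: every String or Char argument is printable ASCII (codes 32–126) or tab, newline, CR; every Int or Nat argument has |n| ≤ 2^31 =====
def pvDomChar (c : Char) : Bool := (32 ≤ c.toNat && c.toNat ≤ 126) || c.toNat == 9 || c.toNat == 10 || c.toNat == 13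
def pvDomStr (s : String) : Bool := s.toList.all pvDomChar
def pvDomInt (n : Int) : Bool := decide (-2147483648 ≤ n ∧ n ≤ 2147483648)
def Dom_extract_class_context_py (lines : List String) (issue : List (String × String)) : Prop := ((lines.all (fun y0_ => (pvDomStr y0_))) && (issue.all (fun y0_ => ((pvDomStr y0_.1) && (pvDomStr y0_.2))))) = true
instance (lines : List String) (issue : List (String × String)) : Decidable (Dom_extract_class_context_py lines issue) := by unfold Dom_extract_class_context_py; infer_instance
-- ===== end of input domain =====

-- B replaces A's single combined forward pass by a forward search for the first 'class ' line
-- plus a backward scan for the last '}' line at or after it (alternative decomposition, same cost).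

-- shared trivial predicates: 'class ' in line, '}' in line
def pvHasClass (s : String) : Bool := PySem.Str.isIn "class " s
def pvHasBrace (s : String) : Bool := PySem.Str.isIn "}" s

-- ===== PORT A =====
-- the single forward loop of A: state (class_start, class_end)
def pvALoop : List (Int × String) → Option Int → Option Int → Option Int × Option Int
  | [], cs, ce => (cs, ce)
  | (i, line) :: rest, cs, ce =>
    let cs' := if pvHasClass line && cs.isNone then some i else cs
    let ce' := if pvHasBrace line && cs'.isSome then some i else ce
    pvALoop rest cs' ce'

def extract_class_context_py (lines : List String) (_issue : List (String × String)) : String :=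
  match pvALoop (PySem.List.enumerate lines 0) none none with
  | (some cs, some ce) => PySem.Str.join "" (PySem.List.slice lines (some cs) (some (ce + 1)))
  | _ => PySem.Str.join "" lines

-- ===== PORT B =====
-- forward scan: next((i for i, line in enumerate(lines) if 'class ' in line), None)
def pvFindClass : List String → Int → Option Int
  | [], _ => none
  | l :: rest, k => if pvHasClass l then some k else pvFindClass rest (k + 1)

-- backward scan: for j, line in reversed(list(enumerate(lines))): break below cs, return first '}'
def pvBackBrace : List (Int × String) → Int → Option Int
  | [], _ => none
  | (j, line) :: rest, cs =>
    if j < cs then none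
    else if pvHasBrace line then some j
    else pvBackBrace rest cs

def extract_class_context_py_alt (lines : List String) (_issue : List (String × String)) : String :=
  match pvFindClass lines 0 with
  | none => PySem.Str.join "" lines
  | some cs =>
    match pvBackBrace (PySem.List.enumerate lines 0).reverse cs with
    | none => PySem.Str.join "" lines
    | some ce => PySem.Str.join "" (PySem.List.slice lines (some cs) (some (ce + 1)))

-- ===== PRECONDITION & SPEC =====
def Spec_extract_class_context_py (lines : List String) (issue : List (String × String)) (out : String) : Prop := out = extract_class_context_py_alt lines issue
instance (lines : List String) (issue : List (String × String)) (out : String) : Decidable (Spec_extract_class_context_py lines issue out) := by unfold Spec_extract_class_context_py; infer_instance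

-- ===== CLAIM (what is proved, stated in full; the proofs are below) =====
def Claim_equal_extract_class_context_py : Prop := ∀ (lines : List String) (issue : List (String × String)), Dom_extract_class_context_py lines issue → Spec_extract_class_context_py lines issue (extract_class_context_py lines issue)

-- ===== LEMMAS AND PROOFS =====

-- the single update A's loop applies to class_end
def pvUpd (acc : Option Int) (p : Int × String) : Option Int :=
  if pvHasBrace p.2 then some p.1 else acc

theorem pvALoop_some (pairs : List (Int × String)) (c : Int) (ce : Option Int) :
    pvALoop pairs (some c) ce = (some c, pairs.foldl pvUpd ce) := by
  induction pairs generalizing ce with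
  | nil => rfl
  | cons p rest ih =>
    obtain ⟨i, line⟩ := p
    simp [pvALoop, pvUpd, List.foldl, ih]

theorem pvALoop_none (pairs : List (Int × String)) (ce : Option Int)
    (h : ∀ p ∈ pairs, pvHasClass p.2 = false) :
    pvALoop pairs none ce = (none, ce) := by
  induction pairs with
  | nil => rfl
  | cons p rest ih =>
    obtain ⟨i, line⟩ := p
    have h1 := h (i, line) (by simp)
    simp only [pvALoop, h1, Bool.false_and, Bool.false_eq_true, if_false, Option.isSome_none,
      Bool.and_false]
    exact ih (fun q hq => h q (by simp [hq]))

theorem pvALoop_append (ys zs : List (Int × String)) (cs ce : Option Int) :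
    pvALoop (ys ++ zs) cs ce = pvALoop zs (pvALoop ys cs ce).1 (pvALoop ys cs ce).2 := by
  induction ys generalizing cs ce with
  | nil => rfl
  | cons p rest ih =>
    obtain ⟨i, line⟩ := p
    simp only [List.cons_append, pvALoop, ih]

theorem pvFoldl_upd_acc (pairs : List (Int × String)) (acc : Option Int) :
    pairs.foldl pvUpd acc = (pairs.foldl pvUpd none).or acc := by
  induction pairs generalizing acc with
  | nil => rfl
  | cons p rest ih =>
    simp only [List.foldl]
    rw [ih (pvUpd acc p), ih (pvUpd none p)]
    cases h : rest.foldl pvUpd none with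
    | some v => rfl
    | none =>
      simp only [Option.or]
      unfold pvUpd
      split <;> rfl

theorem pvEnumerate_append (xs ys : List String) (s : Int) :
    PySem.List.enumerate (xs ++ ys) s
      = PySem.List.enumerate xs s ++ PySem.List.enumerate ys (s + xs.length) := by
  induction xs generalizing s with
  | nil => simp [PySem.List.enumerate_nil]
  | cons x xs ih =>
    simp only [List.cons_append, PySem.List.enumerate_cons, ih, List.length_cons]
    congr 2
    have h : s + 1 + (xs.length : Int) = s + ((xs.length : Int) + 1) := by ring
    push_cast
    rw [h]

theorem pvMem_enumerate_bounds (xs : List String) (s : Int) (p : Int × String)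
    (hp : p ∈ PySem.List.enumerate xs s) : s ≤ p.1 ∧ p.1 < s + xs.length := by
  induction xs generalizing s with
  | nil => simp [PySem.List.enumerate_nil] at hp
  | cons x xs ih =>
    rw [PySem.List.enumerate_cons] at hp
    rcases List.mem_cons.mp hp with h | h
    · subst h
      simp only [List.length_cons]
      push_cast
      omega
    · have := ih (s + 1) h
      simp only [List.length_cons]
      push_cast
      omega

theorem pvMem_enumerate_snd (xs : List String) (s : Int) (p : Int × String)
    (hp : p ∈ PySem.List.enumerate xs s) : p.2 ∈ xs := by
  induction xs generalizing s with
  | nil => simp [PySem.List.enumerate_nil] at hp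
  | cons x xs ih =>
    rw [PySem.List.enumerate_cons] at hp
    rcases List.mem_cons.mp hp with h | h
    · subst h; simp
    · exact List.mem_cons_of_mem _ (ih (s + 1) h)

theorem pvBackBrace_append (ys zs : List (Int × String)) (c : Int)
    (h : ∀ p ∈ ys, c ≤ p.1) :
    pvBackBrace (ys ++ zs) c = (pvBackBrace ys c).or (pvBackBrace zs c) := by
  induction ys with
  | nil => rfl
  | cons p rest ih =>
    obtain ⟨j, line⟩ := p
    have hj : c ≤ j := h (j, line) (by simp)
    simp only [List.cons_append, pvBackBrace, if_neg (by omega : ¬ j < c)]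
    split
    · rfl
    · exact ih (fun q hq => h q (by simp [hq]))

theorem pvBackBrace_of_lt (ys : List (Int × String)) (c : Int)
    (h : ∀ p ∈ ys, p.1 < c) : pvBackBrace ys c = none := by
  cases ys with
  | nil => rfl
  | cons p rest =>
    obtain ⟨j, line⟩ := p
    have hj : j < c := h (j, line) (by simp)
    simp [pvBackBrace, hj]

-- the backward scan over indices ≥ c computes exactly what A's forward fold computes
theorem pvBackBrace_eq_foldl (xs : List String) (m c : Int) (hc : c ≤ m) :
    pvBackBrace (PySem.List.enumerate xs m).reverse c
      = (PySem.List.enumerate xs m).foldl pvUpd none := by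
  induction xs generalizing m with
  | nil => simp [PySem.List.enumerate_nil, pvBackBrace]
  | cons x xs ih =>
    rw [PySem.List.enumerate_cons, List.reverse_cons]
    rw [pvBackBrace_append _ _ c (fun p hp => by
      have := pvMem_enumerate_bounds xs (m + 1) p (List.mem_reverse.mp hp)
      omega)]
    rw [ih (m + 1) (by omega)]
    rw [List.foldl_cons,
      pvFoldl_upd_acc (PySem.List.enumerate xs (m + 1)) (pvUpd none (m, x))]
    congr 1
    simp only [pvBackBrace, pvUpd, if_neg (by omega : ¬ m < c)]

theorem pvFindClass_none (xs : List String) (k : Int)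
    (h : pvFindClass xs k = none) : ∀ l ∈ xs, pvHasClass l = false := by
  induction xs generalizing k with
  | nil => simp
  | cons x xs ih =>
    intro l hl
    unfold pvFindClass at h
    by_cases hx : pvHasClass x = true
    · simp [hx] at h
    · rcases List.mem_cons.mp hl with rfl | hl'
      · simpa using hx
      · exact ih (k + 1) (by simpa [hx] using h) l hl'

theorem pvFindClass_some (xs : List String) (k c : Int)
    (h : pvFindClass xs k = some c) :
    ∃ pre l post, xs = pre ++ l :: post ∧
      (∀ p ∈ pre, pvHasClass p = false) ∧
      pvHasClass l = true ∧ c = k + pre.length := by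
  induction xs generalizing k with
  | nil => simp [pvFindClass] at h
  | cons x xs ih =>
    unfold pvFindClass at h
    by_cases hx : pvHasClass x = true
    · rw [if_pos hx] at h
      refine ⟨[], x, xs, by simp, by simp, hx, ?_⟩
      simp at h
      simp [h.symm]
    · obtain ⟨pre, l, post, hsplit, hpre, hl, hc⟩ := ih (k + 1) (by simpa [hx] using h)
      refine ⟨x :: pre, l, post, by simp [hsplit], ?_, hl, ?_⟩
      · intro p hp
        rcases List.mem_cons.mp hp with rfl | hp'
        · simpa using hx
        · exact hpre p hp'
      · simp only [List.length_cons]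
        push_cast
        omega

-- ===== VERDICT (by name: the statement is the Claim_ definition above) =====
theorem extract_class_context_py_spec : Claim_equal_extract_class_context_py := by
  intro lines issue _
  unfold Spec_extract_class_context_py extract_class_context_py extract_class_context_py_alt
  cases hfc : pvFindClass lines 0 with
  | none =>
    have hall := pvFindClass_none lines 0 hfc
    rw [pvALoop_none (PySem.List.enumerate lines 0) none
      (fun p hp => hall p.2 (pvMem_enumerate_snd lines 0 p hp))]
  | some c =>
    obtain ⟨pre, l, post, hsplit, hpre, hl, hc⟩ := pvFindClass_some lines 0 c hfc
    have hc' : c = (pre.length : Int) := by omega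
    subst hc'
    subst hsplit
    have henum : PySem.List.enumerate (pre ++ l :: post) 0
        = PySem.List.enumerate pre 0
          ++ ((pre.length : Int), l) :: PySem.List.enumerate post ((pre.length : Int) + 1) := by
      rw [pvEnumerate_append, zero_add, PySem.List.enumerate_cons]
    -- A side
    have hA : pvALoop (PySem.List.enumerate (pre ++ l :: post) 0) none none
        = (some (pre.length : Int),
           (PySem.List.enumerate post ((pre.length : Int) + 1)).foldl pvUpd
             (pvUpd none ((pre.length : Int), l))) := by
      rw [henum, pvALoop_append,
        pvALoop_none (PySem.List.enumerate pre 0) none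
          (fun p hp => hpre p.2 (pvMem_enumerate_snd pre 0 p hp))]
      simp only [pvALoop, hl, Option.isNone_none, Bool.and_true, if_true,
        Option.isSome_some]
      rw [pvALoop_some]
      simp [pvUpd]
    -- B side
    have hB : pvBackBrace (PySem.List.enumerate (pre ++ l :: post) 0).reverse (pre.length : Int)
        = (PySem.List.enumerate post ((pre.length : Int) + 1)).foldl pvUpd
            (pvUpd none ((pre.length : Int), l)) := by
      rw [henum, List.reverse_append, List.reverse_cons, List.append_assoc]
      rw [pvBackBrace_append _ _ (pre.length : Int) (fun p hp => by
        have := pvMem_enumerate_bounds post ((pre.length : Int) + 1) p (List.mem_reverse.mp hp)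
        omega)]
      rw [pvBackBrace_eq_foldl post ((pre.length : Int) + 1) (pre.length : Int) (by omega)]
      rw [pvFoldl_upd_acc (PySem.List.enumerate post ((pre.length : Int) + 1))
        (pvUpd none ((pre.length : Int), l))]
      congr 1
      rw [List.singleton_append]
      simp only [pvBackBrace, pvUpd,
        if_neg (by omega : ¬ (pre.length : Int) < (pre.length : Int))]
      split
      · rfl
      · exact pvBackBrace_of_lt _ _ (fun p hp => by
          have := pvMem_enumerate_bounds pre 0 p (List.mem_reverse.mp hp)
          omega)
    simp only [hA, hB]
    cases (PySem.List.enumerate post ((pre.length : Int) + 1)).foldl pvUpd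
        (pvUpd none ((pre.length : Int), l)) with
    | none => rfl
    | some ce => rfl
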